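-- pv_equiv track=rewrite | github.com/erjan/coding_exercises | binarysearch/roomba.py | solve
-- ===== SOURCE A (Python) =====
-- def solve(moves, x, y):
--
--     mx = 0
--     my = 0
--     for m in moves:
--
--         if m == 'NORTH':
--             my+=1
--         if m == 'SOUTH':
--             my-=1
--         if m == 'WEST':
--             mx -=1
--         if m == 'EAST':
--             mx+=1
--
--     if mx == x and my == y:
--         return True
--     return False
-- ===== SOURCE B (Python) =====
-- DELTA = {'NORTH': (0, 1), 'SOUTH': (0, -1), 'WEST': (-1, 0), 'EAST': (1, 0)}
--
-- def net(moves):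
--     """Net displacement of a move list, by divide and conquer:
--     net(whole) = net(left half) + net(right half)."""
--     n = len(moves)
--     if n == 0:
--         return (0, 0)
--     if n == 1:
--         return DELTA.get(moves[0], (0, 0))
--     mid = n // 2
--     lx, ly = net(moves[:mid])
--     rx, ry = net(moves[mid:])
--     return (lx + rx, ly + ry)
--
-- def solve(moves, x, y):
--     nx, ny = net(moves)
--     return nx == x and ny == y
-- ===== Notes on version B (the rewrite author's own statement) =====
-- stated objective: alternative
-- what changed: Replaces A's single left-to-right accumulation with four if-branches by a divide-and-conquer computation of the net displacement (split the list in halves, sum the halves' displacements, with a per-move delta table at the leaves), then compares to (x, y).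
import Mathlib
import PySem

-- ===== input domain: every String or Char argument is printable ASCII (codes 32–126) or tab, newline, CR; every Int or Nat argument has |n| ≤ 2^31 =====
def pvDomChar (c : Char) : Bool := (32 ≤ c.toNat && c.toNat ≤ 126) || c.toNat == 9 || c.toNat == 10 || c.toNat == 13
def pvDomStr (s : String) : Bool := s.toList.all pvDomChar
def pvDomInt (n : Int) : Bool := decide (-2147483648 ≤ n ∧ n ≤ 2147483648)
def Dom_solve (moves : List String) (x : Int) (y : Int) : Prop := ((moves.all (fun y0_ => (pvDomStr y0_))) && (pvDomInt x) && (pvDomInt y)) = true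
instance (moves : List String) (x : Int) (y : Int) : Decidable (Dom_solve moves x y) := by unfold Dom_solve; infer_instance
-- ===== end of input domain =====

-- B replaces A's one-pass branch-per-move accumulation by a divide-and-conquer sum of
-- per-half net displacements with a delta table at the leaves (alternative decomposition; same cost).

-- ===== PORT A =====
def solve (moves : List String) (x : Int) (y : Int) : Bool :=
  let st := moves.foldl (fun (p : Int × Int) m =>
    let p := if m == "NORTH" then (p.1, p.2 + 1) else p
    let p := if m == "SOUTH" then (p.1, p.2 - 1) else p
    let p := if m == "WEST" then (p.1 - 1, p.2) else p
    let p := if m == "EAST" then (p.1 + 1, p.2) else p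
    p) (0, 0)
  if st.1 == x && st.2 == y then true else false

-- ===== PORT B =====
def pvDELTA : PySem.Dict String (Int × Int) :=
  PySem.Dict.ofList [("NORTH", (0, 1)), ("SOUTH", (0, -1)), ("WEST", (-1, 0)), ("EAST", (1, 0))]

-- net displacement by divide and conquer (Source B's `net`)
def net (moves : List String) : Int × Int :=
  match moves with
  | [] => (0, 0)
  | [m] => pvDELTA.getD m (0, 0)
  | m1 :: m2 :: rest =>
    let ms := m1 :: m2 :: rest
    let mid := ms.length / 2
    let l := net (ms.take mid)
    let r := net (ms.drop mid)
    (l.1 + r.1, l.2 + r.2)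
termination_by moves.length
decreasing_by
  · simp only [List.length_take, List.length_cons]; omega
  · simp only [List.length_drop, List.length_cons]; omega

def solve_alt (moves : List String) (x : Int) (y : Int) : Bool :=
  let n := net moves
  n.1 == x && n.2 == y

-- ===== PRECONDITION & SPEC =====
def Spec_solve (moves : List String) (x : Int) (y : Int) (out : Bool) : Prop := out = solve_alt moves x y
instance (moves : List String) (x : Int) (y : Int) (out : Bool) : Decidable (Spec_solve moves x y out) := by unfold Spec_solve; infer_instance

-- ===== CLAIM (what is proved, stated in full; the proofs are below) =====
def Claim_equal_solve : Prop := ∀ (moves : List String) (x : Int) (y : Int), Dom_solve moves x y → Spec_solve moves x y (solve moves x y)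

-- ===== LEMMAS AND PROOFS =====

-- lookup of a non-direction word in the delta table gives (0, 0)
theorem delta_other (m : String) (h1 : ¬m = "NORTH") (h2 : ¬m = "SOUTH")
    (h3 : ¬m = "WEST") (h4 : ¬m = "EAST") : pvDELTA.getD m (0, 0) = (0, 0) := by
  simp [pvDELTA, pysem, PySem.Dict.getD, PySem.Dict.ofList, PySem.Dict.update, h1, h2, h3, h4]

-- A's fold computes the net counts of the four direction words.
theorem foldl_state (moves : List String) (a b : Int) :
    moves.foldl (fun (p : Int × Int) m =>
      let p := if m == "NORTH" then (p.1, p.2 + 1) else p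
      let p := if m == "SOUTH" then (p.1, p.2 - 1) else p
      let p := if m == "WEST" then (p.1 - 1, p.2) else p
      let p := if m == "EAST" then (p.1 + 1, p.2) else p
      p) (a, b)
    = (a + (moves.count "EAST" : Int) - (moves.count "WEST" : Int),
       b + (moves.count "NORTH" : Int) - (moves.count "SOUTH" : Int)) := by
  induction moves generalizing a b with
  | nil => simp
  | cons m rest ih =>
    simp only [List.foldl_cons, List.count_cons]
    by_cases h1 : m = "NORTH" <;> by_cases h2 : m = "SOUTH" <;>
      by_cases h3 : m = "WEST" <;> by_cases h4 : m = "EAST" <;>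
      simp_all <;> ring_nf

-- B's divide-and-conquer net equals the same count expression.
theorem net_eq (moves : List String) :
    net moves = ((moves.count "EAST" : Int) - (moves.count "WEST" : Int),
                 (moves.count "NORTH" : Int) - (moves.count "SOUTH" : Int)) := by
  induction moves using net.induct with
  | case1 => simp [net]
  | case2 m =>
    by_cases h1 : m = "NORTH"
    · subst h1; rw [net]; decide
    by_cases h2 : m = "SOUTH"
    · subst h2; rw [net]; decide
    by_cases h3 : m = "WEST"
    · subst h3; rw [net]; decide
    by_cases h4 : m = "EAST"
    · subst h4; rw [net]; decide
    rw [net, delta_other m h1 h2 h3 h4]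
    simp [h1, h2, h3, h4]
  | case3 m1 m2 rest ms mid ihl ihr =>
    rw [net]
    simp only [ms, mid] at ihl ihr ⊢
    rw [ihl, ihr]
    have hC : ∀ s : String,
        ((m1 :: m2 :: rest).take ((m1 :: m2 :: rest).length / 2)).count s
        + ((m1 :: m2 :: rest).drop ((m1 :: m2 :: rest).length / 2)).count s
        = (m1 :: m2 :: rest).count s := by
      intro s
      rw [← List.count_append, List.take_append_drop]
    have hE := hC "EAST"; have hW := hC "WEST"
    have hN := hC "NORTH"; have hS := hC "SOUTH"
    simp only [Prod.mk.injEq]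
    refine ⟨?_, ?_⟩ <;> push_cast [← hE, ← hW, ← hN, ← hS] <;> ring

-- ===== VERDICT (by name: the statement is the Claim_ definition above) =====
theorem solve_spec : Claim_equal_solve := by
  intro moves x y _
  unfold Spec_solve solve solve_alt
  simp only [foldl_state, net_eq]
  by_cases hx : (moves.count "EAST" : Int) - (moves.count "WEST" : Int) = x <;>
    by_cases hy : (moves.count "NORTH" : Int) - (moves.count "SOUTH" : Int) = y <;>
    simp_all
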